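-- pv_equiv track=rewrite | github.com/isabella-coder/ys_project | backend/app/services/store_service.py | _summarize_followups
-- ===== SOURCE A (Python) =====
-- from typing import Dict, Iterable, List, Optional, Tuple
--
-- def _summarize_followups(items: List[dict]) -> dict:
--     return {
--         "total": len(items),
--         "dueToday": len([i for i in items if i.get("status") == "DUE_TODAY"]),
--         "overdue": len([i for i in items if i.get("status") == "OVERDUE"]),
--         "pending": len([i for i in items if i.get("status") == "PENDING"]),
--         "done": len([i for i in items if i.get("status") == "DONE"]),
--     }
-- ===== SOURCE B (Python) =====
-- def _summarize_followups(items):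
--     dt = od = pd = dn = 0
--     for i in items:
--         s = i.get("status")
--         if s == "DUE_TODAY":
--             dt += 1
--         elif s == "OVERDUE":
--             od += 1
--         elif s == "PENDING":
--             pd += 1
--         elif s == "DONE":
--             dn += 1
--     return {"total": len(items), "dueToday": dt, "overdue": od, "pending": pd, "done": dn}
-- ===== Notes on version B (the rewrite author's own statement) =====
-- stated objective: alternative
-- what changed: Replaces four separate full scans (one filtering comprehension per status) with a single pass over the items maintaining four counters in an if/elif tally.
import Mathlib
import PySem

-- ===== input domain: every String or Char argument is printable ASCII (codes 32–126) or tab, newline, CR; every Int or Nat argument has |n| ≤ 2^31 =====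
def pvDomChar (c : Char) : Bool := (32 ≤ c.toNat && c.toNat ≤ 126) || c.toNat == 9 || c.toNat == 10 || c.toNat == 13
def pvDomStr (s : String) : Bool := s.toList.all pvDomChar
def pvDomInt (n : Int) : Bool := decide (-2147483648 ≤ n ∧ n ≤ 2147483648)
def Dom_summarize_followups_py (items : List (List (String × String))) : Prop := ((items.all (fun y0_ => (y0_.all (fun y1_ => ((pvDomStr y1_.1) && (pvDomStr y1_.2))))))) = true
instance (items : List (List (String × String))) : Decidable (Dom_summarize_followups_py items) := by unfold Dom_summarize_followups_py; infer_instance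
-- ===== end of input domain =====

-- ===== PORT A =====
-- helper: i.get("status") on a Python dict
def pvGetStatus (i : List (String × String)) : Option String :=
  (PySem.Dict.mk i).get? "status"

def summarize_followups_py (items : List (List (String × String))) : List (String × Int) :=
  [("total", (items.length : Int)),
   ("dueToday", ((items.filter (fun i => pvGetStatus i = some "DUE_TODAY")).length : Int)),
   ("overdue", ((items.filter (fun i => pvGetStatus i = some "OVERDUE")).length : Int)),
   ("pending", ((items.filter (fun i => pvGetStatus i = some "PENDING")).length : Int)),
   ("done", ((items.filter (fun i => pvGetStatus i = some "DONE")).length : Int))]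

-- ===== PORT B =====
-- B's single-pass tally loop over the items, maintaining four counters
def pvTally : List (List (String × String)) → Int → Int → Int → Int → Int × Int × Int × Int
  | [], dt, od, pd, dn => (dt, od, pd, dn)
  | i :: rest, dt, od, pd, dn =>
    let s := pvGetStatus i
    if s = some "DUE_TODAY" then pvTally rest (dt + 1) od pd dn
    else if s = some "OVERDUE" then pvTally rest dt (od + 1) pd dn
    else if s = some "PENDING" then pvTally rest dt od (pd + 1) dn
    else if s = some "DONE" then pvTally rest dt od pd (dn + 1)
    else pvTally rest dt od pd dn

def summarize_followups_py_alt (items : List (List (String × String))) : List (String × Int) :=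
  match pvTally items 0 0 0 0 with
  | (dt, od, pd, dn) =>
    [("total", (items.length : Int)), ("dueToday", dt), ("overdue", od), ("pending", pd), ("done", dn)]

-- ===== PRECONDITION & SPEC =====
def Spec_summarize_followups_py (items : List (List (String × String))) (out : List (String × Int)) : Prop := out = summarize_followups_py_alt items
instance (items : List (List (String × String))) (out : List (String × Int)) : Decidable (Spec_summarize_followups_py items out) := by unfold Spec_summarize_followups_py; infer_instance

-- ===== CLAIM (what is proved, stated in full; the proofs are below) =====
def Claim_equal_summarize_followups_py : Prop := ∀ (items : List (List (String × String))), Dom_summarize_followups_py items → Spec_summarize_followups_py items (summarize_followups_py items)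

-- ===== LEMMAS AND PROOFS =====

-- ===== VERDICT (by name: the statement is the Claim_ definition above) =====
theorem pvTally_eq (items : List (List (String × String))) (dt od pd dn : Int) :
    pvTally items dt od pd dn =
      (dt + ((items.filter (fun i => pvGetStatus i = some "DUE_TODAY")).length : Int),
       od + ((items.filter (fun i => pvGetStatus i = some "OVERDUE")).length : Int),
       pd + ((items.filter (fun i => pvGetStatus i = some "PENDING")).length : Int),
       dn + ((items.filter (fun i => pvGetStatus i = some "DONE")).length : Int)) := by
  induction items generalizing dt od pd dn with
  | nil => simp [pvTally]
  | cons i rest ih =>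
    simp only [pvTally, List.filter_cons]
    by_cases h1 : pvGetStatus i = some "DUE_TODAY"
    · simp [h1, ih]
      omega
    · by_cases h2 : pvGetStatus i = some "OVERDUE"
      · simp [h2, ih]
        omega
      · by_cases h3 : pvGetStatus i = some "PENDING"
        · simp [h3, ih]
          omega
        · by_cases h4 : pvGetStatus i = some "DONE"
          · simp [h4, ih]
            omega
          · simp [h1, h2, h3, h4, ih]

theorem summarize_followups_py_spec : Claim_equal_summarize_followups_py := by
  intro items _
  unfold Spec_summarize_followups_py summarize_followups_py summarize_followups_py_alt
  rw [pvTally_eq]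
  simp
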